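-- pv_equiv track=rewrite | github.com/ephemerallylong/self-projects | battleship_ai.py | checkIfWin
-- ===== SOURCE A (Python) =====
-- display_dict = {1: 'S', 0: ' ', -1: 'M', 2: 'X'}
--
-- display_legend = {'M': 'miss', 'X': 'hit'}
--
-- def checkIfWin(hit_array, compare_array):
-- 	"""
-- 	Returns True if all ships have been sunk.
-- 	Returns False otherwise.
-- 	"""
-- 	count_hit = 0
-- 	count_ship = 0
-- 	for i in range(len(hit_array)):
-- 		for j, k in zip(hit_array[i], compare_array[i]):
-- 			if j > 0:
-- 				count_hit += 1
-- 			try: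
-- 				if display_legend[display_dict[k]].lower() == 'hit' and j > 0:
-- 					count_ship += 1
-- 			except KeyError:
-- 				pass
-- 	if count_hit == count_ship:
-- 		return True
-- 	else:
-- 		return False
-- ===== SOURCE B (Python) =====
-- def checkIfWin(hit_array, compare_array):
-- 	"""
-- 	Returns True if all ships have been sunk.
-- 	Returns False otherwise.
-- 	"""
-- 	for i in range(len(hit_array)):
-- 		for j, k in zip(hit_array[i], compare_array[i]):
-- 			if j > 0 and k != 2:
-- 				return False
-- 	return True
-- ===== Notes on version B (the rewrite author's own statement) =====
-- stated objective: simpler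
-- what changed: Replaces A's two running counters compared at the end (and the display_dict/display_legend round-trip deciding 'hit') with a direct short-circuiting predicate: return False as soon as a hit cell (j > 0) is not marked 2, True otherwise.
import Mathlib
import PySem

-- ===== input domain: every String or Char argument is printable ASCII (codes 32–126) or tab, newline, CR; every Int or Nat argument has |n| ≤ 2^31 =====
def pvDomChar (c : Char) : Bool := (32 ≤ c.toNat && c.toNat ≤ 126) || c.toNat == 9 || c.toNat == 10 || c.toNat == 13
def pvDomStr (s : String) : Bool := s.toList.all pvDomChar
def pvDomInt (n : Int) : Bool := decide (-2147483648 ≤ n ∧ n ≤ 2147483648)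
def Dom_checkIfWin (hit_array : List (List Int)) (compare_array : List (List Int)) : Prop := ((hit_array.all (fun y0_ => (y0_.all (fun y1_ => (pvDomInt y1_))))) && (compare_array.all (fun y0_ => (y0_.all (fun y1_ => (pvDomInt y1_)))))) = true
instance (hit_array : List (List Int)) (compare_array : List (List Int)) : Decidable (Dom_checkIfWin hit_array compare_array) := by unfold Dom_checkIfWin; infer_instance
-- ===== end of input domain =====

-- B replaces A's two counters + final equality test by a direct short-circuiting
-- predicate ("every hit cell is marked 2"), dropping the display_dict/display_legend round-trip.


-- ===== PORT A =====
-- one step of A's inner loop over a zipped pair (j, k); the nested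
-- display_legend[display_dict[k]] lookup yields 'hit' exactly for k = 2
-- (k ∈ {1, 0} raises KeyError on display_legend, other k on display_dict; both are caught and passed)
def pvStepA (acc : Int × Int) (jk : Int × Int) : Int × Int :=
  let acc1 := if jk.1 > 0 then (acc.1 + 1, acc.2) else acc
  if jk.2 == 2 && jk.1 > 0 then (acc1.1, acc1.2 + 1) else acc1

-- A's outer loop: i runs over range(len(hit_array)), so hit_array[i] traverses the rows in order;
-- compare_array[i] is indexed (total here via getD []; Pre_ keeps the index in range)
def pvLoopA (compare_array : List (List Int)) : List (List Int) → Int → (Int × Int) → (Int × Int)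
  | [], _, acc => acc
  | row :: rest, i, acc =>
      pvLoopA compare_array rest (i + 1)
        ((row.zip ((PySem.List.pyGet? compare_array i).getD [])).foldl pvStepA acc)

def checkIfWin (hit_array : List (List Int)) (compare_array : List (List Int)) : Bool :=
  let counts := pvLoopA compare_array hit_array 0 (0, 0)
  if counts.1 == counts.2 then true else false

-- ===== PORT B =====
def pvRowOkB : List (Int × Int) → Bool
  | [] => true
  | (j, k) :: rest => if j > 0 && k != 2 then false else pvRowOkB rest

def pvLoopB (compare_array : List (List Int)) : List (List Int) → Int → Bool
  | [], _ => true
  | row :: rest, i =>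
      if pvRowOkB (row.zip ((PySem.List.pyGet? compare_array i).getD []))
      then pvLoopB compare_array rest (i + 1)
      else false

def checkIfWin_alt (hit_array : List (List Int)) (compare_array : List (List Int)) : Bool :=
  pvLoopB compare_array hit_array 0

-- ===== PRECONDITION & SPEC =====
-- Pre_ excludes exactly the inputs where the Python A raises IndexError
-- (compare_array has fewer rows than hit_array); B raises there too.
def Pre_checkIfWin (hit_array : List (List Int)) (compare_array : List (List Int)) : Prop :=
  hit_array.length ≤ compare_array.length
instance (hit_array : List (List Int)) (compare_array : List (List Int)) : Decidable (Pre_checkIfWin hit_array compare_array) := by unfold Pre_checkIfWin; infer_instance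
def pvWitness_checkIfWin : List (List Int) × List (List Int) := ([[1, 0], [0, 1]], [[2, -1], [0, 2]])

def Spec_checkIfWin (hit_array : List (List Int)) (compare_array : List (List Int)) (out : Bool) : Prop := out = checkIfWin_alt hit_array compare_array
instance (hit_array : List (List Int)) (compare_array : List (List Int)) (out : Bool) : Decidable (Spec_checkIfWin hit_array compare_array out) := by unfold Spec_checkIfWin; infer_instance

-- ===== CLAIM (what is proved, stated in full; the proofs are below) =====
def Claim_equal_checkIfWin : Prop := ∀ (hit_array : List (List Int)) (compare_array : List (List Int)), Dom_checkIfWin hit_array compare_array → Pre_checkIfWin hit_array compare_array → Spec_checkIfWin hit_array compare_array (checkIfWin hit_array compare_array)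

-- ===== LEMMAS AND PROOFS =====

-- one step of A's counters, in closed form
theorem pvStepA_eq (a b j k : Int) :
    pvStepA (a, b) (j, k) =
      (a + (if 0 < j then 1 else 0), b + (if 0 < j ∧ k = 2 then 1 else 0)) := by
  simp only [pvStepA]
  split_ifs with h1 h2 h3 <;> simp_all

-- inner loop invariant: count_ship ≤ count_hit, and they are equal exactly when they started
-- equal and every hit cell of the row is marked 2
theorem pvRowA_inv (ps : List (Int × Int)) (a b : Int) (hba : b ≤ a) :
    (ps.foldl pvStepA (a, b)).2 ≤ (ps.foldl pvStepA (a, b)).1 ∧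
    ((ps.foldl pvStepA (a, b)).1 = (ps.foldl pvStepA (a, b)).2 ↔ (a = b ∧ pvRowOkB ps = true)) := by
  induction ps generalizing a b with
  | nil => exact ⟨hba, by simp [pvRowOkB]⟩
  | cons jk rest ih =>
    obtain ⟨j, k⟩ := jk
    simp only [List.foldl_cons, pvStepA_eq]
    by_cases hj : 0 < j
    · by_cases hk : k = 2
      · rw [if_pos hj, if_pos ⟨hj, hk⟩]
        have h := ih (a + 1) (b + 1) (by omega)
        refine ⟨h.1, h.2.trans ?_⟩
        simp [pvRowOkB, hj, hk]
      · rw [if_pos hj, if_neg (fun hc => hk hc.2)]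
        have h := ih (a + 1) b (by omega)
        simp only [add_zero]
        refine ⟨h.1, h.2.trans ?_⟩
        constructor
        · rintro ⟨h1, -⟩; omega
        · rintro ⟨-, h2⟩
          simp [pvRowOkB, hj, hk] at h2
    · rw [if_neg hj, if_neg (fun hc => hj hc.1)]
      have h := ih a b hba
      simp only [add_zero]
      refine ⟨h.1, h.2.trans ?_⟩
      simp [pvRowOkB, hj]

-- outer loop: A's counters end equal iff they started equal and B's loop returns true
theorem pvLoopAB (c : List (List Int)) (rows : List (List Int)) (i : Int) (a b : Int) (hba : b ≤ a) :
    (pvLoopA c rows i (a, b)).2 ≤ (pvLoopA c rows i (a, b)).1 ∧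
    ((pvLoopA c rows i (a, b)).1 = (pvLoopA c rows i (a, b)).2 ↔ (a = b ∧ pvLoopB c rows i = true)) := by
  induction rows generalizing i a b with
  | nil => exact ⟨hba, by simp [pvLoopA, pvLoopB]⟩
  | cons row rest ih =>
    simp only [pvLoopA, pvLoopB]
    rcases hE : (row.zip ((PySem.List.pyGet? c i).getD [])).foldl pvStepA (a, b) with ⟨a', b'⟩
    have hrow := pvRowA_inv (row.zip ((PySem.List.pyGet? c i).getD [])) a b hba
    rw [hE] at hrow
    have h := ih (i + 1) a' b' hrow.1
    refine ⟨h.1, h.2.trans ?_⟩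
    rw [hrow.2]
    by_cases hok : pvRowOkB (row.zip ((PySem.List.pyGet? c i).getD [])) = true
    · simp [hok]
    · simp [hok]

-- ===== VERDICT (by name: the statement is the Claim_ definition above) =====
theorem checkIfWin_spec : Claim_equal_checkIfWin := by
  intro h c _ _
  unfold Spec_checkIfWin checkIfWin checkIfWin_alt
  have hmain := pvLoopAB c h 0 0 0 le_rfl
  rcases hmain with ⟨-, hiff⟩
  cases hpb : pvLoopB c h 0 with
  | true => have := hiff.mpr ⟨rfl, hpb⟩; simp [this]
  | false =>
    have hne : ¬ (pvLoopA c h 0 (0, 0)).1 = (pvLoopA c h 0 (0, 0)).2 := by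
      intro he
      have := (hiff.mp he).2
      rw [hpb] at this
      exact Bool.false_ne_true this
    simp [hne]
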